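-- pv_equiv track=rewrite | github.com/PrismaticPolygon/Bioinformatics3 | fasta.py | get_hotspots
-- ===== SOURCE A (Python) =====
-- def get_hotspots(t, ktup, lookup):
--
--     hotspots = dict()
--
--     for x in range(len(t) - ktup + 1):
--
--         word = t[x:x + ktup]
--
--         if word in lookup:
--
--             for y in lookup[word]:
--
--                 diagonal = y - x
--
--                 if word not in hotspots:
--
--                     hotspots[word] = [(x, y)]
--
--                 else:
--
--                     hotspots[word].append((x, y))
--
--     return hotspots
-- ===== SOURCE B (Python) =====
-- def get_hotspots(t, ktup, lookup):
--     # Phase 1: index every window word of t by its positions, in first-occurrence order.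
--     index = {}
--     for x in range(len(t) - ktup + 1):
--         index.setdefault(t[x:x + ktup], []).append(x)
--     # Phase 2: expand the index against the lookup table.
--     hotspots = {}
--     for word, xs in index.items():
--         ys = lookup.get(word)
--         if ys:
--             hotspots[word] = [(x, y) for x in xs for y in ys]
--     return hotspots
-- ===== Notes on version B (the rewrite author's own statement) =====
-- stated objective: alternative
-- what changed: A interleaves matching and collection in one pass over the windows of t (appending pairs word by word as it scans); B first builds a word-to-positions index of t in one pass and then, in a second pass over that index in insertion order, expands each indexed word that has a non-empty lookup entry into its full (x, y) pair list.
import Mathlib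
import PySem

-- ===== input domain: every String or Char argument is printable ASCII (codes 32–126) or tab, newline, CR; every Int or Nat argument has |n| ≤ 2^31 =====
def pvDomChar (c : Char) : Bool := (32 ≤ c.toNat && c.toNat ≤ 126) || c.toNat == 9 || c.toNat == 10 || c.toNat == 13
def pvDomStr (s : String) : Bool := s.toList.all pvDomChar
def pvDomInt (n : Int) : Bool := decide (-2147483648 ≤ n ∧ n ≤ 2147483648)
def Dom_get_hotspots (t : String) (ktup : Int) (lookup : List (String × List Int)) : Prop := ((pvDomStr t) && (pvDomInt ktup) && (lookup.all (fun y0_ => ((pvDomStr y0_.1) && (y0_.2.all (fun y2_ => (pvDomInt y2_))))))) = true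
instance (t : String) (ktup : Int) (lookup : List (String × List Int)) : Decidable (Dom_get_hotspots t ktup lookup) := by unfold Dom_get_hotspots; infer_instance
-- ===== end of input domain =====

-- B builds a word→positions index of t in one pass and then expands it against `lookup`
-- in a second pass (same result, different decomposition); objective: alternative.

-- ===== PORT A =====
-- single interleaved pass: for each window, if the word is in lookup, append every (x, y)
def get_hotspots (t : String) (ktup : Int) (lookup : List (String × List Int)) : List (String × List (Int × Int)) :=
  let L := PySem.Dict.ofList lookup
  ((PySem.List.pyRange 0 (PySem.Str.len t - ktup + 1) 1).foldl
    (fun (h : PySem.Dict String (List (Int × Int))) x =>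
      let word := String.ofList (PySem.List.slice t.toList (some x) (some (x + ktup)))
      if L.contains word then
        (L.getD word []).foldl
          (fun d y =>
            if !d.contains word then d.insert word [(x, y)]
            else d.insert word (d.getD word [] ++ [(x, y)]))
          h
      else h)
    PySem.Dict.empty).items

-- ===== PORT B =====
-- two passes: word→positions index of t, then expansion of the index against lookup
def get_hotspots_alt (t : String) (ktup : Int) (lookup : List (String × List Int)) : List (String × List (Int × Int)) :=
  let L := PySem.Dict.ofList lookup
  let index := (PySem.List.pyRange 0 (PySem.Str.len t - ktup + 1) 1).foldl
    (fun (d : PySem.Dict String (List Int)) x =>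
      d.modify (String.ofList (PySem.List.slice t.toList (some x) (some (x + ktup)))) [] (· ++ [x]))
    PySem.Dict.empty
  (index.items.foldl
    (fun (h : PySem.Dict String (List (Int × Int))) p =>
      let ys := L.getD p.1 []
      if ys.isEmpty then h
      else h.insert p.1 (p.2.flatMap (fun x => ys.map (fun y => (x, y)))))
    PySem.Dict.empty).items

-- ===== PRECONDITION & SPEC =====
def Spec_get_hotspots (t : String) (ktup : Int) (lookup : List (String × List Int)) (out : List (String × List (Int × Int))) : Prop := out = get_hotspots_alt t ktup lookup
instance (t : String) (ktup : Int) (lookup : List (String × List Int)) (out : List (String × List (Int × Int))) : Decidable (Spec_get_hotspots t ktup lookup out) := by unfold Spec_get_hotspots; infer_instance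

-- ===== CLAIM (what is proved, stated in full; the proofs are below) =====
def Claim_equal_get_hotspots : Prop := ∀ (t : String) (ktup : Int) (lookup : List (String × List Int)), Dom_get_hotspots t ktup lookup → Spec_get_hotspots t ktup lookup (get_hotspots t ktup lookup)

-- ===== LEMMAS AND PROOFS =====

-- appending one pair at a time for every y equals one append of the whole mapped list
lemma pv_insert_append_foldl {κ β γ : Type} [BEq κ] [LawfulBEq κ]
    (ys : List β) (k : κ) (f : β → γ) (h : PySem.Dict κ (List γ)) (hne : ys ≠ []) :
    ys.foldl (fun d y => d.insert k (d.getD k [] ++ [f y])) h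
      = h.insert k (h.getD k [] ++ ys.map f) := by
  induction ys generalizing h with
  | nil => exact absurd rfl hne
  | cons y ys ih =>
    rcases ys with _ | ⟨y', ys'⟩
    · simp
    · rw [List.foldl_cons, ih _ (by simp)]
      rw [PySem.Dict.getD_insert_self, PySem.Dict.insert_insert_self]
      simp

-- A's inner loop: the contains-test branches coincide
lemma pv_stepA_inner {κ γ : Type} [BEq κ] [LawfulBEq κ]
    (ys : List Int) (k : κ) (f : Int → γ) (h : PySem.Dict κ (List γ)) :
    ys.foldl (fun d y =>
        if !d.contains k then d.insert k [f y]
        else d.insert k (d.getD k [] ++ [f y])) h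
      = ys.foldl (fun d y => d.insert k (d.getD k [] ++ [f y])) h := by
  apply PySem.List.foldl_congr_mem
  intro acc y _
  by_cases hc : acc.contains k = true
  · simp [hc]
  · simp only [Bool.not_eq_true] at hc
    simp [hc, PySem.Dict.getD_of_not_contains _ _ hc]

-- a block of appends at the same key as singleton modifies
lemma pv_block_modify {κ γ : Type} [BEq κ] [LawfulBEq κ]
    (gxs : List Int) (w : Int → κ) (g : Int → List Int) (F : Int → Int → γ)
    (d : PySem.Dict κ (List γ)) (hne : ∀ x ∈ gxs, g x ≠ []) :
    gxs.foldl (fun h x => h.insert (w x) (h.getD (w x) [] ++ (g x).map (F x))) d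
      = (gxs.flatMap (fun x => (g x).map (fun y => (w x, F x y)))).foldl
          (fun d p => d.modify p.1 [] (· ++ [p.2])) d := by
  induction gxs generalizing d with
  | nil => rfl
  | cons x gxs ih =>
    rw [List.flatMap_cons, List.foldl_append, List.foldl_cons, List.foldl_map]
    rw [ih _ (fun z hz => hne z (List.mem_cons_of_mem _ hz))]
    congr 1
    have hx := pv_insert_append_foldl (g x) (w x) (F x) d (hne x (List.mem_cons_self))
    rw [← hx]
    apply PySem.List.foldl_congr_mem
    intro acc y _
    simp [PySem.Dict.modify]

-- update by a nonempty constant block is a single add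
lemma pv_update_const {α β : Type} [BEq α] [LawfulBEq α]
    (ys : List β) (a : α) (s : PySem.Set α) (hne : ys ≠ []) :
    PySem.Set.update s (ys.map (fun _ => a)) = PySem.Set.add s a := by
  induction ys generalizing s with
  | nil => exact absurd rfl hne
  | cons y ys ih =>
    rcases ys with _ | ⟨y', ys'⟩
    · rfl
    · show PySem.Set.update (PySem.Set.add s a) ((y' :: ys').map (fun _ => a)) = _
      rw [ih _ (by simp)]
      show (if (PySem.Set.add s a).contains a then _ else _) = _
      simp

-- dedup of a flatMap of nonempty constant blocks = dedup of the block heads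
lemma pv_ofList_flatMap_const {α β : Type} [BEq α] [LawfulBEq α]
    (l : List Int) (g : Int → List β) (w : Int → α) (hne : ∀ x ∈ l, g x ≠ []) :
    PySem.Set.ofList (l.flatMap (fun x => (g x).map (fun _ => w x)))
      = PySem.Set.ofList (l.map w) := by
  suffices h : ∀ s : PySem.Set α,
      PySem.Set.update s (l.flatMap (fun x => (g x).map (fun _ => w x)))
        = PySem.Set.update s (l.map w) from h PySem.Set.empty
  induction l with
  | nil => intro s; rfl
  | cons x l ih =>
    intro s
    rw [List.flatMap_cons, List.map_cons]
    show PySem.Set.update s (_ ++ _) = _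
    rw [PySem.Set.update, List.foldl_append, ← PySem.Set.update, ← PySem.Set.update]
    rw [pv_update_const _ _ _ (hne x (List.mem_cons_self))]
    exact ih (fun z hz => hne z (List.mem_cons_of_mem _ hz)) _

lemma pv_contains_ofList {α : Type} [BEq α] [LawfulBEq α] (l : List α) (x : α) :
    (PySem.Set.ofList l).contains x = decide (x ∈ l) := by
  have hm := PySem.Set.mem_ofList l x
  by_cases hx : x ∈ l
  · simp [PySem.Set.contains, hm, hx]
  · simp [PySem.Set.contains, hm, hx]

lemma pv_ofList_append_singleton {α : Type} [BEq α] (l : List α) (x : α) :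
    PySem.Set.ofList (l ++ [x]) = PySem.Set.add (PySem.Set.ofList l) x := by
  rw [PySem.Set.ofList_eq_foldl, PySem.Set.ofList_eq_foldl, List.foldl_append]
  rfl

-- dedup commutes with filter
lemma pv_ofList_filter {α : Type} [BEq α] [LawfulBEq α] (l : List α) (p : α → Bool) :
    PySem.Set.ofList (l.filter p) = (PySem.Set.ofList l).filter p := by
  induction l using List.reverseRecOn with
  | nil => rfl
  | append_singleton l x ih =>
    rw [List.filter_append, pv_ofList_append_singleton, PySem.Set.add, pv_contains_ofList]
    by_cases hx : x ∈ l
    · simp only [hx, decide_true, if_pos]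
      rw [← ih]
      by_cases hp : p x = true
      · rw [show List.filter p [x] = [x] by simp [hp], pv_ofList_append_singleton,
          PySem.Set.add, pv_contains_ofList]
        have hmem : x ∈ l.filter p := List.mem_filter.mpr ⟨hx, hp⟩
        simp [hmem]
      · simp [hp]
    · simp only [hx, decide_false, Bool.false_eq_true, if_false]
      rw [List.filter_append, ← ih]
      by_cases hp : p x = true
      · rw [show List.filter p [x] = [x] by simp [hp], pv_ofList_append_singleton,
          PySem.Set.add, pv_contains_ofList]
        have hmem : x ∉ l.filter p := fun hmem => hx (List.mem_filter.mp hmem).1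
        simp [hmem]
      · simp [hp]

-- a guarded flatMap is a flatMap over the filtered list
lemma pv_flatMap_if {α β : Type} (l : List α) (p : α → Bool) (f : α → List β) :
    l.flatMap (fun x => if p x then f x else []) = (l.filter p).flatMap f := by
  induction l with
  | nil => rfl
  | cons x l ih =>
    by_cases hp : p x = true <;> simp [hp, ih]

lemma pv_update_nil {α : Type} [BEq α] (l : List α) :
    PySem.Set.update ([] : PySem.Set α) l = PySem.Set.ofList l := by
  rw [PySem.Set.ofList_eq_foldl]; rfl

-- per-key values of the two programs agree (k a word with a nonempty lookup list)
lemma pv_val_eq (w : Int → String) (L : PySem.Dict String (List Int)) (xs : List Int) (k : String)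
    (hk : (!(L.getD k []).isEmpty) = true) :
    (((xs.filter (fun x => !(L.getD (w x) []).isEmpty)).flatMap
        (fun x => (L.getD (w x) []).map (fun y => (w x, (x, y))))).filter (fun p => p.1 == k)).map (fun p => p.2)
    = (xs.filter (fun x => w x == k)).flatMap (fun x => (L.getD k []).map (fun y => (x, y))) := by
  rw [List.filter_flatMap, List.map_flatMap]
  have h1 : ∀ x ∈ xs.filter (fun x => !(L.getD (w x) []).isEmpty),
      (((L.getD (w x) []).map (fun y => (w x, (x, y)))).filter (fun p => p.1 == k)).map (fun p => p.2)
        = if w x == k then (L.getD (w x) []).map (fun y => (x, y)) else [] := by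
    intro x _
    rw [List.filter_map]
    by_cases hwx : (w x == k) = true
    · rw [if_pos hwx,
        show List.filter ((fun p => p.1 == k) ∘ fun y => (w x, (x, y))) (L.getD (w x) [])
            = L.getD (w x) [] from List.filter_eq_self.mpr (fun a _ => hwx),
        List.map_map]
      rfl
    · rw [if_neg (by simpa using hwx),
        show List.filter ((fun p => p.1 == k) ∘ fun y => (w x, (x, y))) (L.getD (w x) [])
            = [] from List.filter_eq_nil_iff.mpr (fun a _ => by simpa using hwx)]
      rfl
  rw [List.flatMap_congr h1, pv_flatMap_if, List.filter_filter]
  have h2 : ∀ x ∈ xs, ((w x == k) && !(L.getD (w x) []).isEmpty) = (w x == k) := by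
    intro x _
    by_cases hwx : (w x == k) = true
    · have heq : w x = k := beq_iff_eq.mp hwx
      rw [hwx, heq, hk]
      rfl
    · simp only [Bool.not_eq_true] at hwx
      simp [hwx]
  rw [List.filter_congr h2]
  exact List.flatMap_congr (fun x hx => by
    have heq : w x = k := beq_iff_eq.mp (List.mem_filter.mp hx).2
    rw [heq])

-- the whole equivalence, generic in the window function
set_option maxHeartbeats 1000000 in
lemma pv_general (w : Int → String) (L : PySem.Dict String (List Int)) (xs : List Int) :
    (List.foldl (fun (h : PySem.Dict String (List (Int × Int))) x =>
        if L.contains (w x) then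
          (L.getD (w x) []).foldl (fun d y =>
            if !d.contains (w x) then d.insert (w x) [(x, y)]
            else d.insert (w x) (d.getD (w x) [] ++ [(x, y)])) h
        else h) PySem.Dict.empty xs).items
    = (List.foldl (fun (h : PySem.Dict String (List (Int × Int))) p =>
          if (L.getD p.1 []).isEmpty then h
          else h.insert p.1 (p.2.flatMap (fun x => (L.getD p.1 []).map (fun y => (x, y)))))
        PySem.Dict.empty
        (List.foldl (fun (d : PySem.Dict String (List Int)) x => d.modify (w x) [] (· ++ [x]))
          PySem.Dict.empty xs).items).items := by
  -- A: turn the interleaved pass into one fold of singleton modifies over expanded pairs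
  have hA1 : List.foldl (fun (h : PySem.Dict String (List (Int × Int))) x =>
        if L.contains (w x) then
          (L.getD (w x) []).foldl (fun d y =>
            if !d.contains (w x) then d.insert (w x) [(x, y)]
            else d.insert (w x) (d.getD (w x) [] ++ [(x, y)])) h
        else h) PySem.Dict.empty xs
      = List.foldl (fun (h : PySem.Dict String (List (Int × Int))) x =>
          if !(L.getD (w x) []).isEmpty then
            h.insert (w x) (h.getD (w x) [] ++ (L.getD (w x) []).map (fun y => (x, y)))
          else h) PySem.Dict.empty xs := by
    apply PySem.List.foldl_congr_mem
    intro acc x _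
    by_cases hc : L.contains (w x) = true
    · rw [if_pos hc]
      cases hys : L.getD (w x) [] with
      | nil => simp
      | cons y ys' =>
        rw [pv_stepA_inner, pv_insert_append_foldl _ _ _ _ (List.cons_ne_nil _ _)]
        simp
    · have hc' : L.contains (w x) = false := by simpa using hc
      rw [if_neg hc, PySem.Dict.getD_of_not_contains _ _ hc']
      simp
  have hgxs : ∀ x ∈ xs.filter (fun x => !(L.getD (w x) []).isEmpty), L.getD (w x) [] ≠ [] := by
    intro x hx heq
    have h2 := (List.mem_filter.mp hx).2
    rw [heq] at h2
    simp at h2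
  rw [hA1, PySem.List.foldl_if_eq_foldl_filter,
    pv_block_modify _ w (fun x => L.getD (w x) []) (fun x y => (x, y)) _ hgxs]
  -- characterize the A-side dict
  have hAnodup : ((List.filter (fun x => !(L.getD (w x) []).isEmpty) xs).flatMap
        (fun x => (L.getD (w x) []).map (fun y => (w x, (x, y)))) |>.foldl
        (fun d p => d.modify p.1 [] (· ++ [p.2])) PySem.Dict.empty).keys.Nodup :=
    PySem.Dict.nodup_keys_foldl_modify_key
      ((List.filter (fun x => !(L.getD (w x) []).isEmpty) xs).flatMap
        (fun x => (L.getD (w x) []).map (fun y => (w x, (x, y)))))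
      (fun (p : String × (Int × Int)) => p.1) []
      (fun (_ : PySem.Dict String (List (Int × Int))) (p : String × (Int × Int)) => (· ++ [p.2]))
      PySem.Dict.empty PySem.Dict.nodup_keys_empty
  rw [PySem.Dict.items_eq_map_keys _ hAnodup ([] : List (Int × Int))]
  have hAkeys : ((List.filter (fun x => !(L.getD (w x) []).isEmpty) xs).flatMap
        (fun x => (L.getD (w x) []).map (fun y => (w x, (x, y)))) |>.foldl
        (fun d p => d.modify p.1 [] (· ++ [p.2])) PySem.Dict.empty).keys
      = (PySem.Set.ofList (xs.map w)).filter (fun k => !(L.getD k []).isEmpty) := by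
    have h1 : ((List.filter (fun x => !(L.getD (w x) []).isEmpty) xs).flatMap
          (fun x => (L.getD (w x) []).map (fun y => (w x, (x, y)))) |>.foldl
          (fun d p => d.modify p.1 [] (· ++ [p.2])) PySem.Dict.empty).keys
        = PySem.Set.update PySem.Dict.empty.keys
            (((List.filter (fun x => !(L.getD (w x) []).isEmpty) xs).flatMap
              (fun x => (L.getD (w x) []).map (fun y => (w x, (x, y))))).map (fun p => p.1)) :=
      PySem.Dict.keys_foldl_modify_key
        ((List.filter (fun x => !(L.getD (w x) []).isEmpty) xs).flatMap
          (fun x => (L.getD (w x) []).map (fun y => (w x, (x, y)))))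
        (fun (p : String × (Int × Int)) => p.1) []
        (fun (_ : PySem.Dict String (List (Int × Int))) (p : String × (Int × Int)) => (· ++ [p.2]))
        PySem.Dict.empty
    rw [h1, PySem.Dict.keys_empty, pv_update_nil]
    have h2 : (((List.filter (fun x => !(L.getD (w x) []).isEmpty) xs).flatMap
          (fun x => (L.getD (w x) []).map (fun y => (w x, (x, y))))).map (fun p => p.1))
        = (List.filter (fun x => !(L.getD (w x) []).isEmpty) xs).flatMap
            (fun x => (L.getD (w x) []).map (fun _ => w x)) := by
      rw [List.map_flatMap]
      exact List.flatMap_congr (fun x _ => by rw [List.map_map]; rfl)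
    rw [h2, pv_ofList_flatMap_const _ (fun x => L.getD (w x) []) w hgxs,
      ← pv_ofList_filter, List.filter_map]
    rfl
  rw [hAkeys]
  have hAgetD : ∀ k : String, ((List.filter (fun x => !(L.getD (w x) []).isEmpty) xs).flatMap
        (fun x => (L.getD (w x) []).map (fun y => (w x, (x, y)))) |>.foldl
        (fun d p => d.modify p.1 [] (· ++ [p.2])) PySem.Dict.empty).getD k []
      = (((List.filter (fun x => !(L.getD (w x) []).isEmpty) xs).flatMap
          (fun x => (L.getD (w x) []).map (fun y => (w x, (x, y))))).filter
            (fun p => p.1 == k)).map (fun p => p.2) := by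
    intro k
    have h3 : ((List.filter (fun x => !(L.getD (w x) []).isEmpty) xs).flatMap
          (fun x => (L.getD (w x) []).map (fun y => (w x, (x, y)))) |>.foldl
          (fun d p => d.modify p.1 [] (· ++ [p.2])) PySem.Dict.empty).getD k []
        = PySem.Dict.empty.getD k [] ++ (((List.filter (fun x => !(L.getD (w x) []).isEmpty) xs).flatMap
            (fun x => (L.getD (w x) []).map (fun y => (w x, (x, y))))).filter
              (fun p => p.1 == k)).map (fun p => p.2) :=
      PySem.Dict.getD_foldl_modify_append _ _ _
    rw [h3, PySem.Dict.getD_empty, List.nil_append]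
  -- B: characterize index, then the expansion pass
  have hInodup : (List.foldl (fun (d : PySem.Dict String (List Int)) x => d.modify (w x) [] (· ++ [x]))
        PySem.Dict.empty xs).keys.Nodup :=
    PySem.Dict.nodup_keys_foldl_modify_key xs w []
      (fun (_ : PySem.Dict String (List Int)) (x : Int) => (· ++ [x]))
      PySem.Dict.empty PySem.Dict.nodup_keys_empty
  have hIkeys : (List.foldl (fun (d : PySem.Dict String (List Int)) x => d.modify (w x) [] (· ++ [x]))
        PySem.Dict.empty xs).keys = PySem.Set.ofList (xs.map w) := by
    have h1 : (List.foldl (fun (d : PySem.Dict String (List Int)) x => d.modify (w x) [] (· ++ [x]))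
          PySem.Dict.empty xs).keys = PySem.Set.update PySem.Dict.empty.keys (xs.map w) :=
      PySem.Dict.keys_foldl_modify_key xs w []
        (fun (_ : PySem.Dict String (List Int)) (x : Int) => (· ++ [x])) PySem.Dict.empty
    rw [h1, PySem.Dict.keys_empty, pv_update_nil]
  have hIgetD : ∀ k : String, (List.foldl (fun (d : PySem.Dict String (List Int)) x =>
        d.modify (w x) [] (· ++ [x])) PySem.Dict.empty xs).getD k []
      = xs.filter (fun x => w x == k) := by
    intro k
    have h0 : List.foldl (fun (d : PySem.Dict String (List Int)) x => d.modify (w x) [] (· ++ [x]))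
          PySem.Dict.empty xs
        = List.foldl (fun d p => d.modify p.1 [] (· ++ [p.2])) PySem.Dict.empty
            (xs.map (fun x => (w x, x))) := by
      rw [List.foldl_map]
    rw [h0]
    have h1 : (List.foldl (fun (d : PySem.Dict String (List Int)) p => d.modify p.1 [] (· ++ [p.2]))
          PySem.Dict.empty (xs.map (fun x => (w x, x)))).getD k []
        = PySem.Dict.empty.getD k []
            ++ ((xs.map (fun x => (w x, x))).filter (fun p => p.1 == k)).map (fun p => p.2) :=
      PySem.Dict.getD_foldl_modify_append _ _ _
    rw [h1, PySem.Dict.getD_empty, List.nil_append, List.filter_map, List.map_map]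
    exact congrFun (congrArg List.map rfl) _ |>.trans (List.map_id _) |>.symm ▸ rfl
  have hIitems : (List.foldl (fun (d : PySem.Dict String (List Int)) x => d.modify (w x) [] (· ++ [x]))
        PySem.Dict.empty xs).items
      = (PySem.Set.ofList (xs.map w)).map (fun k => (k, xs.filter (fun x => w x == k))) := by
    rw [PySem.Dict.items_eq_map_keys _ hInodup ([] : List Int), hIkeys]
    exact List.map_congr_left (fun k _ => by rw [hIgetD k])
  rw [hIitems]
  -- phase 2 of B
  have hstep2 : List.foldl (fun (h : PySem.Dict String (List (Int × Int))) p =>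
        if (L.getD p.1 []).isEmpty then h
        else h.insert p.1 (p.2.flatMap (fun x => (L.getD p.1 []).map (fun y => (x, y)))))
        PySem.Dict.empty
        ((PySem.Set.ofList (xs.map w)).map (fun k => (k, xs.filter (fun x => w x == k))))
      = List.foldl (fun (h : PySem.Dict String (List (Int × Int))) p =>
          if !(L.getD p.1 []).isEmpty then
            h.insert p.1 (p.2.flatMap (fun x => (L.getD p.1 []).map (fun y => (x, y))))
          else h) PySem.Dict.empty
          ((PySem.Set.ofList (xs.map w)).map (fun k => (k, xs.filter (fun x => w x == k)))) := by
    apply PySem.List.foldl_congr_mem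
    intro acc p _
    by_cases he : (L.getD p.1 []).isEmpty = true <;> simp [he]
  rw [hstep2, PySem.List.foldl_if_eq_foldl_filter, List.filter_map]
  have hfreshnodup : (((PySem.Set.ofList (xs.map w)).filter
        ((fun p => !(L.getD p.1 []).isEmpty) ∘ fun k => (k, xs.filter (fun x => w x == k)))
        |>.map (fun k => (k, xs.filter (fun x => w x == k)))).map (fun p => p.1)).Nodup := by
    rw [List.map_map]
    have hmapid : ∀ (l : List String),
        List.map ((fun (p : String × List Int) => p.1) ∘ fun k => (k, xs.filter (fun x => w x == k))) l = l := by
      intro l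
      induction l with
      | nil => rfl
      | cons a l ih => simp [ih]
    rw [hmapid]
    exact List.Nodup.filter _ (PySem.Set.nodup_ofList (xs.map w))
  have hfresh := PySem.Dict.items_foldl_insert_fresh
    ((PySem.Set.ofList (xs.map w)).filter
        ((fun p => !(L.getD p.1 []).isEmpty) ∘ fun k => (k, xs.filter (fun x => w x == k)))
      |>.map (fun k => (k, xs.filter (fun x => w x == k))))
    (fun p => p.1)
    (fun p => p.2.flatMap (fun x => (L.getD p.1 []).map (fun y => (x, y))))
    PySem.Dict.empty
    (fun a _ => PySem.Dict.contains_empty _)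
    hfreshnodup
  rw [hfresh, List.map_map]
  show List.map _ _ = List.map _ ([] ++ _)
  rw [List.nil_append]
  refine Eq.trans (List.map_congr_left ?_) (by rfl)
  intro k hk
  have hgood : (!(L.getD k []).isEmpty) = true := (List.mem_filter.mp hk).2
  show (k, _) = (k, _)
  rw [hAgetD k, pv_val_eq w L xs k hgood]

lemma pv_main (t : String) (ktup : Int) (lookup : List (String × List Int)) :
    get_hotspots t ktup lookup = get_hotspots_alt t ktup lookup :=
  pv_general (fun x => String.ofList (PySem.List.slice t.toList (some x) (some (x + ktup))))
    (PySem.Dict.ofList lookup) (PySem.List.pyRange 0 (PySem.Str.len t - ktup + 1) 1)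

-- ===== VERDICT (by name: the statement is the Claim_ definition above) =====
theorem get_hotspots_spec : Claim_equal_get_hotspots := by
  intro t ktup lookup _
  exact pv_main t ktup lookup
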